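-- pv_equiv track=rewrite | github.com/Monica-1107/legalmind | backend/services/knowledge_graph_service.py | _get_paragraph_index
-- ===== SOURCE A (Python) =====
-- def _get_paragraph_index(text, char_pos):
--     """Identify which paragraph an entity belongs to"""
--     paragraphs = text.split('\n\n')
--     current_pos = 0
--
--     for i, para in enumerate(paragraphs):
--         if current_pos <= char_pos < current_pos + len(para):
--             return i
--         current_pos += len(para) + 2  # +2 for the '\n\n'
--
--     return 0  # Default to first paragraph
-- ===== SOURCE B (Python) =====
-- def _get_paragraph_index(text, char_pos):
--     """Identify which paragraph an entity belongs to"""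
--     paragraphs = text.split('\n\n')
--     starts = []
--     s = 0
--     for p in paragraphs:
--         starts.append(s)
--         s += len(p) + 2
--     # binary search: lo = first index with starts[lo] > char_pos (bisect_right)
--     lo, hi = 0, len(starts)
--     while lo < hi:
--         mid = (lo + hi) // 2
--         if starts[mid] <= char_pos:
--             lo = mid + 1
--         else:
--             hi = mid
--     i = lo - 1
--     if i >= 0 and char_pos < starts[i] + len(paragraphs[i]):
--         return i
--     return 0
-- ===== Notes on version B (the rewrite author's own statement) =====
-- stated objective: alternative
-- what changed: A's linear running-offset scan over the paragraphs is replaced by a precomputed start-offset table plus a hand-rolled bisect_right binary search and a single containment check.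
import Mathlib
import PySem

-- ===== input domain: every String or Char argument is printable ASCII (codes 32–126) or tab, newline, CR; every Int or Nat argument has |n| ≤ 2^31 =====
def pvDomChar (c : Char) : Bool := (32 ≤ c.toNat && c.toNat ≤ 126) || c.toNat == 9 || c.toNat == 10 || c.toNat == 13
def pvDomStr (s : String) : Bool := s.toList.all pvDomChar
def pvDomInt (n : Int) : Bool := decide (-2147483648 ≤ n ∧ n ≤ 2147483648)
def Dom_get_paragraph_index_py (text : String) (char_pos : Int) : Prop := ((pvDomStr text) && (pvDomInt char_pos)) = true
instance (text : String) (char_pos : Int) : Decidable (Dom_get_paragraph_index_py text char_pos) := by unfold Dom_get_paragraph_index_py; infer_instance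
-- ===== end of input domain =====

-- B replaces A's linear running-offset scan by a precomputed start-offset table plus a
-- hand-rolled binary search (bisect_right) and one containment check (objective: alternative).

-- text.split('\n\n'): sep is the non-empty literal "\n\n", so split? is always some (exact)
def pvParas (text : String) : List String := (PySem.Str.split? text "\n\n").getD []

-- ===== PORT A =====
-- the enumerate loop with early return of A
def pvScanA : List String → Int → Int → Int → Int
  | [], _, _, _ => 0
  | p :: rest, cp, i, cur =>
      if cur ≤ cp ∧ cp < cur + PySem.Str.len p then i
      else pvScanA rest cp (i + 1) (cur + PySem.Str.len p + 2)

def get_paragraph_index_py (text : String) (char_pos : Int) : Int :=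
  pvScanA (pvParas text) char_pos 0 0

-- ===== PORT B =====
-- the while-loop binary search of B (lo, hi ≥ 0 in Python, so Nat; (lo+hi)//2 = Nat division)
def pvBsearch (starts : List Int) (cp : Int) (lo hi : Nat) : Nat :=
  if lo < hi then
    if PySem.List.pyGetD starts (((lo + hi) / 2 : Nat) : Int) 0 ≤ cp then
      pvBsearch starts cp ((lo + hi) / 2 + 1) hi
    else pvBsearch starts cp lo ((lo + hi) / 2)
  else lo
termination_by hi - lo
decreasing_by all_goals omega

def get_paragraph_index_py_alt (text : String) (char_pos : Int) : Int :=
  let paragraphs := pvParas text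
  let acc := paragraphs.foldl
    (fun (a : List Int × Int) p => (a.1 ++ [a.2], a.2 + PySem.Str.len p + 2)) ([], 0)
  let starts := acc.1
  let lo := pvBsearch starts char_pos 0 starts.length
  let i : Int := (lo : Int) - 1
  if 0 ≤ i ∧ char_pos < PySem.List.pyGetD starts i 0 + PySem.Str.len (PySem.List.pyGetD paragraphs i "") then i
  else 0

-- ===== PRECONDITION & SPEC =====
def Spec_get_paragraph_index_py (text : String) (char_pos : Int) (out : Int) : Prop := out = get_paragraph_index_py_alt text char_pos
instance (text : String) (char_pos : Int) (out : Int) : Decidable (Spec_get_paragraph_index_py text char_pos out) := by unfold Spec_get_paragraph_index_py; infer_instance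

-- ===== CLAIM (what is proved, stated in full; the proofs are below) =====
def Claim_equal_get_paragraph_index_py : Prop := ∀ (text : String) (char_pos : Int), Dom_get_paragraph_index_py text char_pos → Spec_get_paragraph_index_py text char_pos (get_paragraph_index_py text char_pos)

-- ===== LEMMAS AND PROOFS =====

-- start offsets of the paragraphs, in the mathematically convenient recursive form
def pvStartsFrom (s : Int) : List String → List Int
  | [] => []
  | p :: r => s :: pvStartsFrom (s + PySem.Str.len p + 2) r

-- the first paragraph (relative index) whose half-open interval contains cp, if any
def pvFirstHit (cur : Int) (cp : Int) : List String → Option Nat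
  | [] => none
  | p :: r =>
      if cur ≤ cp ∧ cp < cur + PySem.Str.len p then some 0
      else (pvFirstHit (cur + PySem.Str.len p + 2) cp r).map (· + 1)

theorem pvStartsFrom_length (s : Int) (ps : List String) :
    (pvStartsFrom s ps).length = ps.length := by
  induction ps generalizing s with
  | nil => rfl
  | cons p r ih => simp [pvStartsFrom, ih]

theorem pvFoldl_starts (ps : List String) (acc : List Int) (s : Int) :
    (ps.foldl (fun (a : List Int × Int) p => (a.1 ++ [a.2], a.2 + PySem.Str.len p + 2)) (acc, s)).1
      = acc ++ pvStartsFrom s ps := by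
  induction ps generalizing acc s with
  | nil => simp [pvStartsFrom]
  | cons p r ih =>
    rw [List.foldl_cons, ih]
    simp [pvStartsFrom]

theorem pvStartsFrom_getD (s : Int) (ps : List String) (j : Nat) (h : j < ps.length) :
    (pvStartsFrom s ps).getD j 0
      = s + ((ps.take j).map (fun p => PySem.Str.len p + 2)).sum := by
  induction ps generalizing s j with
  | nil => simp at h
  | cons p r ih =>
    cases j with
    | zero => simp [pvStartsFrom]
    | succ j' =>
      simp only [pvStartsFrom, List.getD_cons_succ, List.take_succ_cons, List.map_cons,
        List.sum_cons]
      rw [ih _ j' (by simpa using h)]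
      ring

theorem pvLen_nonneg (p : String) : 0 ≤ PySem.Str.len p := by
  simp [PySem.Str.len_eq]

-- starts j + len ps[j] + 2 = starts (j+1)
theorem pvStartsFrom_succ (s : Int) (ps : List String) (j : Nat) (h : j + 1 < ps.length) :
    (pvStartsFrom s ps).getD (j + 1) 0
      = (pvStartsFrom s ps).getD j 0 + PySem.Str.len (ps.getD j "") + 2 := by
  rw [pvStartsFrom_getD s ps (j+1) h, pvStartsFrom_getD s ps j (by omega)]
  have hj : j < ps.length := by omega
  rw [List.take_add_one]
  simp [List.getD, hj]
  ring

theorem pvStartsFrom_mono (s : Int) (ps : List String) (j k : Nat)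
    (hjk : j ≤ k) (hk : k < ps.length) :
    (pvStartsFrom s ps).getD j 0 ≤ (pvStartsFrom s ps).getD k 0 := by
  induction k with
  | zero =>
    have hj0 : j = 0 := by omega
    simp [hj0]
  | succ k' ih =>
    rcases Nat.lt_or_ge j (k' + 1) with hlt | hge
    · have h1 := ih (by omega) (by omega)
      have h2 := pvStartsFrom_succ s ps k' hk
      have := pvLen_nonneg (ps.getD k' "")
      omega
    · have : j = k' + 1 := by omega
      simp [this]

-- binary-search boundary lemma
theorem pvBsearch_spec (starts : List Int) (cp : Int)
    (hmono : ∀ j k, j ≤ k → k < starts.length → starts.getD j 0 ≤ starts.getD k 0)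
    (lo hi : Nat)
    (hhi : hi ≤ starts.length) (hlohi : lo ≤ hi)
    (hLo : ∀ j, j < lo → starts.getD j 0 ≤ cp)
    (hHi : ∀ j, hi ≤ j → j < starts.length → ¬ starts.getD j 0 ≤ cp) :
    lo ≤ pvBsearch starts cp lo hi ∧ pvBsearch starts cp lo hi ≤ hi ∧
      (∀ j, j < pvBsearch starts cp lo hi → starts.getD j 0 ≤ cp) ∧
      (∀ j, pvBsearch starts cp lo hi ≤ j → j < starts.length → ¬ starts.getD j 0 ≤ cp) := by
  suffices H : ∀ n lo hi, hi - lo = n → hi ≤ starts.length → lo ≤ hi →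
      (∀ j, j < lo → starts.getD j 0 ≤ cp) →
      (∀ j, hi ≤ j → j < starts.length → ¬ starts.getD j 0 ≤ cp) →
      lo ≤ pvBsearch starts cp lo hi ∧ pvBsearch starts cp lo hi ≤ hi ∧
        (∀ j, j < pvBsearch starts cp lo hi → starts.getD j 0 ≤ cp) ∧
        (∀ j, pvBsearch starts cp lo hi ≤ j → j < starts.length → ¬ starts.getD j 0 ≤ cp) by
    exact H _ lo hi rfl hhi hlohi hLo hHi
  intro n
  induction n using Nat.strong_induction_on with
  | _ n ih =>
    intro lo hi hn hhi hlohi hLo hHi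
    rw [pvBsearch]
    by_cases h : lo < hi
    · rw [if_pos h]
      have hmlt : (lo + hi) / 2 < hi := by omega
      have hmlen : (lo + hi) / 2 < starts.length := by omega
      have hmlo : lo ≤ (lo + hi) / 2 := by omega
      by_cases hp : PySem.List.pyGetD starts (((lo + hi) / 2 : Nat) : Int) 0 ≤ cp
      · have hp' : starts.getD ((lo + hi) / 2) 0 ≤ cp := by
          rw [PySem.List.pyGetD_natCast] at hp; exact hp
        rw [if_pos hp]
        have hrec := ih (hi - ((lo + hi) / 2 + 1)) (by omega) ((lo + hi) / 2 + 1) hi rfl hhi (by omega)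
          (fun j hj => le_trans (hmono j ((lo + hi) / 2) (by omega) hmlen) hp')
          hHi
        exact ⟨by omega, hrec.2.1, hrec.2.2.1, hrec.2.2.2⟩
      · have hp' : ¬ starts.getD ((lo + hi) / 2) 0 ≤ cp := by
          rw [PySem.List.pyGetD_natCast] at hp; exact hp
        rw [if_neg hp]
        have hrec := ih ((lo + hi) / 2 - lo) (by omega) lo ((lo + hi) / 2) rfl (by omega) (by omega)
          hLo
          (fun j hj hjlen h2 => hp' (le_trans (hmono ((lo + hi) / 2) j hj hjlen) h2))
        exact ⟨hrec.1, by omega, hrec.2.2.1, hrec.2.2.2⟩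
    · rw [if_neg h]
      exact ⟨le_refl _, by omega, fun j hj => hLo j hj, fun j hj hjl => hHi j (by omega) hjl⟩

-- scan A from index i and offset cur, in terms of the relative first hit
theorem pvScanA_eq (ps : List String) (cp i cur : Int) :
    pvScanA ps cp i cur = match pvFirstHit cur cp ps with
      | some j => i + j
      | none => 0 := by
  induction ps generalizing i cur with
  | nil => rfl
  | cons p r ih =>
    by_cases h : cur ≤ cp ∧ cp < cur + PySem.Str.len p
    · simp only [pvScanA, pvFirstHit]
      rw [if_pos h, if_pos h]
      simp
    · simp only [pvScanA, pvFirstHit]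
      rw [if_neg h, if_neg h, ih]
      cases hfh : pvFirstHit (cur + PySem.Str.len p + 2) cp r with
      | none => simp
      | some j => simp; ring

-- a hit at the first-hit index
theorem pvFirstHit_some (cur cp : Int) (ps : List String) (j : Nat)
    (h : pvFirstHit cur cp ps = some j) :
    j < ps.length ∧ (pvStartsFrom cur ps).getD j 0 ≤ cp ∧
      cp < (pvStartsFrom cur ps).getD j 0 + PySem.Str.len (ps.getD j "") := by
  induction ps generalizing cur j with
  | nil => simp [pvFirstHit] at h
  | cons p r ih =>
    by_cases hc : cur ≤ cp ∧ cp < cur + PySem.Str.len p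
    · simp only [pvFirstHit] at h
      rw [if_pos hc] at h
      cases h
      simpa [pvStartsFrom] using hc
    · simp only [pvFirstHit] at h
      rw [if_neg hc] at h
      rw [Option.map_eq_some_iff] at h
      obtain ⟨j', hj', rfl⟩ := h
      have := ih _ _ hj'
      simpa [pvStartsFrom] using this

-- a hit anywhere implies a first hit exists, at the SAME index (intervals are disjoint)
theorem pvFirstHit_of_hit (cur cp : Int) (ps : List String) (j : Nat)
    (hj : j < ps.length)
    (h1 : (pvStartsFrom cur ps).getD j 0 ≤ cp)
    (h2 : cp < (pvStartsFrom cur ps).getD j 0 + PySem.Str.len (ps.getD j "")) :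
    pvFirstHit cur cp ps = some j := by
  induction ps generalizing cur j with
  | nil => simp at hj
  | cons p r ih =>
    cases j with
    | zero =>
      simp only [pvStartsFrom, List.getD_cons_zero] at h1 h2
      simp only [pvFirstHit]
      rw [if_pos ⟨h1, h2⟩]
    | succ j' =>
      simp only [pvStartsFrom, List.getD_cons_succ] at h1 h2
      have hnot : ¬ (cur ≤ cp ∧ cp < cur + PySem.Str.len p) := by
        intro ⟨_, hlt⟩
        have hmono := pvStartsFrom_mono (cur + PySem.Str.len p + 2) r 0 j' (by omega) (by simpa using hj)
        have h0 : (pvStartsFrom (cur + PySem.Str.len p + 2) r).getD 0 0 = cur + PySem.Str.len p + 2 := by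
          cases r with
          | nil => simp at hj
          | cons q r' => simp [pvStartsFrom]
        omega
      simp only [pvFirstHit, if_neg hnot]
      rw [ih _ j' (by simpa using hj) h1 h2]
      rfl
-- ===== VERDICT (by name: the statement is the Claim_ definition above) =====
theorem get_paragraph_index_py_spec : Claim_equal_get_paragraph_index_py := by
  intro text cp _
  unfold Spec_get_paragraph_index_py get_paragraph_index_py get_paragraph_index_py_alt
  generalize pvParas text = ps
  dsimp only
  rw [pvFoldl_starts ps [] 0, List.nil_append]
  have hlen : (pvStartsFrom 0 ps).length = ps.length := pvStartsFrom_length 0 ps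
  have hmono : ∀ j k, j ≤ k → k < (pvStartsFrom 0 ps).length →
      (pvStartsFrom 0 ps).getD j 0 ≤ (pvStartsFrom 0 ps).getD k 0 := by
    intro j k hjk hk
    exact pvStartsFrom_mono 0 ps j k hjk (by omega)
  have hrec := pvBsearch_spec (pvStartsFrom 0 ps) cp hmono 0 (pvStartsFrom 0 ps).length
    (le_refl _) (Nat.zero_le _)
    (fun j hj => absurd hj (Nat.not_lt_zero j)) (fun j hj hjl => absurd hjl (by omega))
  rw [pvScanA_eq]
  cases hfh : pvFirstHit 0 cp ps with
  | some j =>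
    obtain ⟨hjlen, hle, hlt⟩ := pvFirstHit_some 0 cp ps j hfh
    have hjr : j < pvBsearch (pvStartsFrom 0 ps) cp 0 (pvStartsFrom 0 ps).length := by
      by_contra hc
      exact hrec.2.2.2 j (by omega) (by omega) hle
    have hrj : pvBsearch (pvStartsFrom 0 ps) cp 0 (pvStartsFrom 0 ps).length ≤ j + 1 := by
      by_contra hc
      have h2 := hrec.2.2.1 (j + 1) (by omega)
      have h3 := pvStartsFrom_succ 0 ps j (by omega)
      have h4 := pvLen_nonneg (ps.getD j "")
      omega
    have hrj' : pvBsearch (pvStartsFrom 0 ps) cp 0 (pvStartsFrom 0 ps).length = j + 1 := by omega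
    rw [hrj']
    have hcast : ((j + 1 : Nat) : Int) - 1 = (j : Int) := by push_cast; ring
    rw [hcast, PySem.List.pyGetD_natCast, PySem.List.pyGetD_natCast]
    rw [if_pos ⟨by positivity, hlt⟩]
    simp
  | none =>
    rcases Nat.eq_zero_or_pos (pvBsearch (pvStartsFrom 0 ps) cp 0 (pvStartsFrom 0 ps).length)
      with h0 | h1
    · rw [h0, if_neg]
      rintro ⟨ha, -⟩
      norm_num at ha
    · have hrlen : pvBsearch (pvStartsFrom 0 ps) cp 0 (pvStartsFrom 0 ps).length ≤ ps.length := by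
        have := hrec.2.1
        omega
      have hpred := hrec.2.2.1 (pvBsearch (pvStartsFrom 0 ps) cp 0 (pvStartsFrom 0 ps).length - 1)
        (by omega)
      have hnot : ¬ cp < (pvStartsFrom 0 ps).getD
          (pvBsearch (pvStartsFrom 0 ps) cp 0 (pvStartsFrom 0 ps).length - 1) 0 +
          PySem.Str.len (ps.getD (pvBsearch (pvStartsFrom 0 ps) cp 0 (pvStartsFrom 0 ps).length - 1) "") := by
        intro hcon
        have := pvFirstHit_of_hit 0 cp ps
          (pvBsearch (pvStartsFrom 0 ps) cp 0 (pvStartsFrom 0 ps).length - 1)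
          (by omega) hpred hcon
        rw [hfh] at this
        cases this
      have hcast : ((pvBsearch (pvStartsFrom 0 ps) cp 0 (pvStartsFrom 0 ps).length : Nat) : Int) - 1
          = ((pvBsearch (pvStartsFrom 0 ps) cp 0 (pvStartsFrom 0 ps).length - 1 : Nat) : Int) := by
        omega
      rw [hcast, PySem.List.pyGetD_natCast, PySem.List.pyGetD_natCast, if_neg]
      rintro ⟨-, hcon⟩
      exact hnot hcon
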